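-- pv_equiv track=rewrite | github.com/BrentOgden/ReName-main | scriptThread.py | contains_consecutive_numbers
-- ===== SOURCE A (Python) =====
-- def contains_consecutive_numbers(text):
--     # Function to check if text contains three or more consecutive numbers
--     consecutive_numbers = 0
--     for char in text:
--         if char.isdigit():
--             consecutive_numbers += 1
--             if consecutive_numbers >= 3:
--                 return True
--         else:
--             consecutive_numbers = 0
--     return False
-- ===== SOURCE B (Python) =====
-- def contains_consecutive_numbers(text):
--     # Sliding window: check every triple of adjacent characters.
--     return any(a.isdigit() and b.isdigit() and c.isdigit()
--                for a, b, c in zip(text, text[1:], text[2:]))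
-- ===== Notes on version B (the rewrite author's own statement) =====
-- stated objective: idiomatic
-- what changed: B replaces A's running counter with a sliding-window check: it zips the text with its two shifted copies and asks whether any triple of adjacent characters is all digits.
import Mathlib
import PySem

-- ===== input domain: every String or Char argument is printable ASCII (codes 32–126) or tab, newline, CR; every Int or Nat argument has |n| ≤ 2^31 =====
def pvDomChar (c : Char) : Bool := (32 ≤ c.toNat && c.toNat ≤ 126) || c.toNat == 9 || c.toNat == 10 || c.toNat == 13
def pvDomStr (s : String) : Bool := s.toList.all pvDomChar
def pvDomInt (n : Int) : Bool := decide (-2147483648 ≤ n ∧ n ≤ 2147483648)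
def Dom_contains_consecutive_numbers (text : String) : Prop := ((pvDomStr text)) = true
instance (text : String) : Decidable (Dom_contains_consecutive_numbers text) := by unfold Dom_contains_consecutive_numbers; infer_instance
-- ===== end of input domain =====

-- B replaces A's running counter with a sliding-window check (zip the text with its
-- two shifted copies and test every adjacent triple); same O(n) cost, objective: idiomatic.

-- ===== PORT A =====
-- A's loop: running counter of consecutive digits, early return at 3.
def pvGoA : List Char → Nat → Bool
  | [], _ => false
  | c :: rest, k =>
    if c.isDigit then
      if k + 1 ≥ 3 then true else pvGoA rest (k + 1)
    else
      pvGoA rest 0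

def contains_consecutive_numbers (text : String) : Bool :=
  pvGoA text.toList 0

-- ===== PORT B =====
-- zip(text, text[1:], text[2:]) and `any` over the adjacent triples.
def pvZB (l : List Char) : Bool :=
  (List.zip l (List.zip (l.drop 1) (l.drop 2))).any
    (fun p => p.1.isDigit && p.2.1.isDigit && p.2.2.isDigit)

def contains_consecutive_numbers_alt (text : String) : Bool :=
  pvZB text.toList

-- ===== PRECONDITION & SPEC =====
def Spec_contains_consecutive_numbers (text : String) (out : Bool) : Prop := out = contains_consecutive_numbers_alt text
instance (text : String) (out : Bool) : Decidable (Spec_contains_consecutive_numbers text out) := by unfold Spec_contains_consecutive_numbers; infer_instance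

-- ===== CLAIM =====
def Claim_equal_contains_consecutive_numbers : Prop := ∀ (text : String), Dom_contains_consecutive_numbers text → Spec_contains_consecutive_numbers text (contains_consecutive_numbers text)

-- ===== LEMMAS AND PROOFS =====

-- first-three-all-digits window test
def pvWin3 : List Char → Bool
  | a :: b :: c :: _ => a.isDigit && b.isDigit && c.isDigit
  | _ => false

theorem pvZB_cons (a : Char) (r : List Char) :
    pvZB (a :: r) = (pvWin3 (a :: r) || pvZB r) := by
  match r with
  | [] => simp [pvZB, pvWin3]
  | [b] => simp [pvZB, pvWin3]
  | b :: c :: u => simp [pvZB, pvWin3]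

theorem pvKey : ∀ l : List Char,
    (pvGoA l 0 = pvZB l) ∧
    (pvGoA l 1 = (((l.take 2).all Char.isDigit && decide (2 ≤ l.length)) || pvZB l)) ∧
    (pvGoA l 2 = (((l.take 1).all Char.isDigit && decide (1 ≤ l.length)) || pvZB l)) := by
  intro l
  induction l with
  | nil => simp [pvGoA, pvZB]
  | cons a r ih =>
    obtain ⟨ih0, ih1, ih2⟩ := ih
    by_cases h : a.isDigit
    · refine ⟨?_, ?_, ?_⟩
      · -- k = 0
        rw [pvZB_cons]
        have : pvGoA (a :: r) 0 = pvGoA r 1 := by simp [pvGoA, h]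
        rw [this, ih1]
        match r with
        | [] => simp [pvWin3]
        | [b] => simp [pvWin3]
        | b :: c :: u => simp [pvWin3, h]
      · -- k = 1
        rw [pvZB_cons]
        have : pvGoA (a :: r) 1 = pvGoA r 2 := by simp [pvGoA, h]
        rw [this, ih2]
        match r with
        | [] => simp [pvWin3, h]
        | [b] => simp [pvWin3, h]
        | b :: c :: u => cases hb : b.isDigit <;> simp [pvWin3, h, hb]
      · -- k = 2
        rw [pvZB_cons]
        have : pvGoA (a :: r) 2 = true := by simp [pvGoA, h]
        rw [this]
        simp [h]
    · have hb : a.isDigit = false := by simpa using h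
      have hA : ∀ k, k < 3 → pvGoA (a :: r) k = pvGoA r 0 := by
        intro k hk; simp [pvGoA, hb]
      have hw : pvWin3 (a :: r) = false := by
        match r with
        | [] => simp [pvWin3]
        | [b] => simp [pvWin3]
        | b :: c :: u => simp [pvWin3, hb]
      rw [pvZB_cons]
      exact ⟨by rw [hA 0 (by omega), ih0, hw]; simp,
             by rw [hA 1 (by omega), ih0, hw]; simp [hb],
             by rw [hA 2 (by omega), ih0, hw]; simp [hb]⟩

-- ===== VERDICT =====
theorem contains_consecutive_numbers_spec : Claim_equal_contains_consecutive_numbers := by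
  intro text _
  unfold Spec_contains_consecutive_numbers contains_consecutive_numbers contains_consecutive_numbers_alt
  exact (pvKey text.toList).1
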